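-- pv_equiv track=rewrite | github.com/skypank-coder/openenv_regaudit | inference_runtime.py | choose_target_file
-- ===== SOURCE A (Python) =====
-- from typing import Any
--
-- def choose_target_file(obs: dict[str, Any]) -> str | None:
--     files = [f["name"] for f in obs.get("available_files", [])]
--
--     priority_keywords = [
--         "routes", "views", "middleware",
--         "models", "settings", "auth", "payment",
--     ]
--
--     for keyword in priority_keywords:
--         for file_name in files:
--             if keyword in file_name.lower():
--                 return file_name
--
--     return files[0] if files else None
-- ===== SOURCE B (Python) =====
-- from typing import Any
--
-- PRIORITY = ("routes", "views", "middleware", "models", "settings", "auth", "payment")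
--
-- def choose_target_file(obs: dict[str, Any]) -> str | None:
--     inf = len(PRIORITY)
--     best = None
--     best_rank = inf
--     fallback = None          # name of the first file, if any
--     for entry in obs.get("available_files", []):
--         name = entry["name"]
--         if fallback is None:
--             fallback = name
--         low = name.lower()
--         r = next((i for i, kw in enumerate(PRIORITY) if kw in low), inf)
--         if r < best_rank:
--             best, best_rank = name, r
--     return best if best is not None else fallback
-- ===== Notes on version B (the rewrite author's own statement) =====
-- stated objective: alternative
-- what changed: Replaces the keyword-outer/file-inner early-return scan by a single pass over the file entries that maintains a running argmin of each file's keyword rank (updating only on strict improvement so the earliest file wins ties) together with the first file name as fallback.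
import Mathlib
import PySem

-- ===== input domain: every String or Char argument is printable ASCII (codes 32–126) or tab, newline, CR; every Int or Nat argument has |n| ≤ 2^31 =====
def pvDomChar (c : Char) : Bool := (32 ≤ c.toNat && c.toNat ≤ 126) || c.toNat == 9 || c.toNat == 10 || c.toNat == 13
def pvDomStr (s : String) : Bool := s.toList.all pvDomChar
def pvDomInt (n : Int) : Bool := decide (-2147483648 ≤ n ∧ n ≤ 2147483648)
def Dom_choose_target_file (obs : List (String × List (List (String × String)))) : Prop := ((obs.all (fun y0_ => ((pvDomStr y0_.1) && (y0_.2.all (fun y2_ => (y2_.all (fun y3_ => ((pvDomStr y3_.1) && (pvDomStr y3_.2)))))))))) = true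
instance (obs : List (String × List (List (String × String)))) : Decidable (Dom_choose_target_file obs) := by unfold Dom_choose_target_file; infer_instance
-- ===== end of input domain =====

-- B replaces A's keyword-outer early-return scan by one pass over the files maintaining a
-- running argmin of each file's keyword rank (alternative decomposition, same cost).

-- ===== PORT A =====
-- priority_keywords
def pvKwsA : List String := ["routes", "views", "middleware", "models", "settings", "auth", "payment"]

-- files = [f["name"] for f in obs.get("available_files", [])]
-- f["name"] raises KeyError when absent; Pre_ excludes that, so getD "" is exact here.
def pvFilesA (obs : List (String × List (List (String × String)))) : List String :=
  ((PySem.Dict.mk obs).getD "available_files" []).map (fun f => (PySem.Dict.mk f).getD "name" "")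

-- for keyword in priority_keywords: for file_name in files: if keyword in file_name.lower(): return file_name
def pvLoopA (kws : List String) (files : List String) : Option String :=
  match kws with
  | [] => none
  | k :: ks =>
    match files.find? (fun name => PySem.Str.isIn k (PySem.Str.lower name)) with
    | some name => some name
    | none => pvLoopA ks files

def choose_target_file (obs : List (String × List (List (String × String)))) : Option String :=
  let files := pvFilesA obs
  match pvLoopA pvKwsA files with
  | some name => some name
  | none => match files with
            | [] => none
            | f0 :: _ => some f0     -- files[0] if files else None

-- ===== PORT B =====
def pvKwsB : List String := ["routes", "views", "middleware", "models", "settings", "auth", "payment"]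

-- r = next((i for i, kw in enumerate(PRIORITY) if kw in low), inf)
def pvRankB (low : String) : Int :=
  match (PySem.List.enumerate pvKwsB).find? (fun p => PySem.Str.isIn p.2 low) with
  | some p => p.1
  | none => (pvKwsB.length : Int)

-- one loop iteration over a file entry; state = (best, best_rank, fallback)
def pvStepB (st : Option String × Int × Option String) (entry : List (String × String)) :
    Option String × Int × Option String :=
  let name := (PySem.Dict.mk entry).getD "name" ""   -- entry["name"]; KeyError excluded by Pre_
  let fb := match st.2.2 with
            | none => some name                       -- if fallback is None: fallback = name
            | some _ => st.2.2
  let r := pvRankB (PySem.Str.lower name)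
  if r < st.2.1 then (some name, r, fb) else (st.1, st.2.1, fb)

def choose_target_file_alt (obs : List (String × List (List (String × String)))) : Option String :=
  let st := ((PySem.Dict.mk obs).getD "available_files" []).foldl
              pvStepB (none, (pvKwsB.length : Int), none)
  match st.1 with
  | some name => some name
  | none => st.2.2                -- best if best is not None else fallback

-- ===== PRECONDITION & SPEC =====
-- Pre_ excludes only inputs where A raises KeyError: a file dict without the key "name".
def Pre_choose_target_file (obs : List (String × List (List (String × String)))) : Prop :=
  ∀ f ∈ (PySem.Dict.mk obs).getD "available_files" [], ((PySem.Dict.mk f).get? "name").isSome = true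
instance (obs : List (String × List (List (String × String)))) : Decidable (Pre_choose_target_file obs) := by unfold Pre_choose_target_file; infer_instance

def pvWitness_choose_target_file : (List (String × List (List (String × String)))) :=
  [("available_files", [[("name", "app_routes.py")], [("name", "auth.py")]])]

def Spec_choose_target_file (obs : List (String × List (List (String × String)))) (out : Option String) : Prop := out = choose_target_file_alt obs
instance (obs : List (String × List (List (String × String)))) (out : Option String) : Decidable (Spec_choose_target_file obs out) := by unfold Spec_choose_target_file; infer_instance

-- ===== CLAIM (what is proved, stated in full; the proofs are below) =====
def Claim_equal_choose_target_file : Prop := ∀ (obs : List (String × List (List (String × String)))), Dom_choose_target_file obs → Pre_choose_target_file obs → Spec_choose_target_file obs (choose_target_file obs)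

-- ===== LEMMAS AND PROOFS =====

-- proof-side rank: index of the first keyword of ks contained in low, else ks.length
def rankL : List String → String → Int
  | [], _ => 0
  | k :: ks, low => if PySem.Str.isIn k (PySem.Str.lower low) then 0 else rankL ks low + 1

def stepL (ks : List String) (st : Option String × Int) (name : String) : Option String × Int :=
  let r := rankL ks name
  if r < st.2 then (some name, r) else st

lemma rankL_nonneg (ks : List String) (low : String) : 0 ≤ rankL ks low := by
  induction ks with
  | nil => simp [rankL]
  | cons k ks ih => simp only [rankL]; split <;> omega

lemma rankB_eq (low : String) : pvRankB (PySem.Str.lower low) = rankL pvKwsB low := by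
  simp only [pvRankB, pvKwsB, rankL, PySem.List.enumerate, List.find?]
  split_ifs <;> simp_all

-- the one-pass fold over entries = the (best, rank) fold over the names plus the first name
lemma foldB_bridge (entries : List (List (String × String))) :
    ∀ (b : Option String) (br : Int) (fb : Option String),
      entries.foldl pvStepB (b, br, fb)
        = (((entries.map (fun f => (PySem.Dict.mk f).getD "name" "")).foldl (stepL pvKwsB) (b, br)).1,
           ((entries.map (fun f => (PySem.Dict.mk f).getD "name" "")).foldl (stepL pvKwsB) (b, br)).2,
           fb.or ((entries.map (fun f => (PySem.Dict.mk f).getD "name" "")).head?)) := by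
  induction entries with
  | nil => intro b br fb; simp
  | cons e es ih =>
      intro b br fb
      simp only [List.foldl_cons, List.map_cons, List.head?_cons, pvStepB, stepL, rankB_eq]
      by_cases hlt : rankL pvKwsB ((PySem.Dict.mk e).getD "name" "") < br
      · rw [if_pos hlt, if_pos hlt, ih]
        cases fb <;> simp [Option.or]
      · rw [if_neg hlt, if_neg hlt, ih]
        cases fb <;> simp [Option.or]

-- once best_rank is 0 nothing improves
lemma foldl_stepL_zero (ks : List String) (files : List String) (b : Option String) :
    files.foldl (stepL ks) (b, 0) = (b, 0) := by
  induction files with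
  | nil => rfl
  | cons f fs ih =>
      have h := rankL_nonneg ks f
      simp only [List.foldl_cons, stepL]
      rw [if_neg (by omega)]
      exact ih

-- no file matches k: folding with (k::ks) from br+1 is folding with ks from br, rank shifted
lemma foldl_stepL_shift (k : String) (ks : List String) (files : List String)
    (h : ∀ f ∈ files, ¬ (PySem.Str.isIn k (PySem.Str.lower f) = true)) :
    ∀ (b : Option String) (br : Int),
      files.foldl (stepL (k :: ks)) (b, br + 1)
        = ((files.foldl (stepL ks) (b, br)).1, (files.foldl (stepL ks) (b, br)).2 + 1) := by
  induction files with
  | nil => intro b br; rfl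
  | cons f fs ih =>
      intro b br
      have hf : ¬ (PySem.Str.isIn k (PySem.Str.lower f) = true) := h f (by simp)
      have hfs : ∀ g ∈ fs, ¬ (PySem.Str.isIn k (PySem.Str.lower g) = true) :=
        fun g hg => h g (by simp [hg])
      simp only [List.foldl_cons, stepL, rankL, if_neg hf]
      by_cases hlt : rankL ks f < br
      · rw [if_pos (by omega), if_pos hlt, ih hfs]
      · rw [if_neg (by omega), if_neg hlt, ih hfs]

-- some file matches k: the fold ends at (first matcher, 0)
lemma foldl_stepL_found (k : String) (ks : List String) (files : List String) (f0 : String)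
    (hfind : files.find? (fun n => PySem.Str.isIn k (PySem.Str.lower n)) = some f0) :
    ∀ (b : Option String) (br : Int), 1 ≤ br →
      files.foldl (stepL (k :: ks)) (b, br) = (some f0, 0) := by
  induction files with
  | nil => intro b br _; simp at hfind
  | cons f fs ih =>
      intro b br hbr
      by_cases hf : PySem.Str.isIn k (PySem.Str.lower f) = true
      · rw [List.find?_cons_of_pos (p := fun n => PySem.Str.isIn k (PySem.Str.lower n)) hf] at hfind
        injection hfind with hf0; subst hf0
        simp only [List.foldl_cons, stepL, rankL, if_pos hf]
        rw [if_pos (by omega)]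
        exact foldl_stepL_zero _ _ _
      · rw [List.find?_cons_of_neg (p := fun n => PySem.Str.isIn k (PySem.Str.lower n)) (by simpa using hf)] at hfind
        have h1 : 0 ≤ rankL ks f := rankL_nonneg ks f
        simp only [List.foldl_cons, stepL, rankL, if_neg hf]
        by_cases hlt : rankL ks f + 1 < br
        · rw [if_pos hlt]; exact ih hfind _ _ (by omega)
        · rw [if_neg hlt]; exact ih hfind _ _ hbr

lemma loopA_eq_fold (kws : List String) (files : List String) :
    pvLoopA kws files = (files.foldl (stepL kws) (none, (kws.length : Int))).1 := by
  induction kws with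
  | nil =>
      simp [pvLoopA, foldl_stepL_zero]
  | cons k ks ih =>
      cases hfind : files.find? (fun n => PySem.Str.isIn k (PySem.Str.lower n)) with
      | some f0 =>
          simp only [pvLoopA, hfind]
          rw [foldl_stepL_found k ks files f0 hfind none _ (by simp)]
      | none =>
          have hnone : ∀ f ∈ files, ¬ (PySem.Str.isIn k (PySem.Str.lower f) = true) := by
            intro f hf
            have := List.find?_eq_none.mp hfind f hf
            simpa using this
          simp only [pvLoopA, hfind]
          have : ((k :: ks).length : Int) = (ks.length : Int) + 1 := by simp
          rw [this, foldl_stepL_shift k ks files hnone none (ks.length : Int)]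
          exact ih

lemma finish_eq (files : List String) :
    (match pvLoopA pvKwsA files with
     | some name => some name
     | none => match files with | [] => none | f0 :: _ => some f0)
    = (match (files.foldl (stepL pvKwsB) (none, (pvKwsB.length : Int))).1 with
       | some name => some name
       | none => Option.or none files.head?) := by
  rw [show pvKwsB = pvKwsA from rfl, ← loopA_eq_fold]
  cases pvLoopA pvKwsA files with
  | some name => rfl
  | none => cases files <;> rfl

-- ===== VERDICT (by name: the statement is the Claim_ definition above) =====
theorem choose_target_file_spec : Claim_equal_choose_target_file := by
  intro obs _ _
  show choose_target_file obs = choose_target_file_alt obs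
  unfold choose_target_file choose_target_file_alt
  simp only [foldB_bridge]
  exact finish_eq _
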